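-- pv_equiv track=rewrite | github.com/ZaidQourah2004/CSE231 | Projects/Python/Network Analysis Project/proj08.py | find_max_friends
-- ===== SOURCE A (Python) =====
-- def find_max_friends(names_lst, friends_lst):
--     """
--     This function finds the names of the people who have the most friends.
--     The first part of this function find a dictionary of each person and
--     a list of their friends; then the length of each list is stored and
--     the highest value is stored. Each key-value pair in the dictionary will
--     be reviewed and the lengths of each item in the dict will be compared
--     and the key/s of the longest list will be added to a list. This function
--     returns the list and also the maximum number of friends.
--     """
--     maximum = -1 # used to make an algorithim to find the maximum value of friends.
--
--     friends_dict = zip(names_lst, friends_lst)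
--     friends_dict = dict(friends_dict)
--     list_of_max = []
--
--     for key, val in friends_dict.items():
--         if len(val) > maximum:
--             maximum = len(val)
--
--     for key, val in friends_dict.items():
--         if len(val) == maximum:
--             list_of_max.append(key)
--     list_of_max.sort() # sorts names in alphabetical order
--     return(list_of_max, maximum)
-- ===== SOURCE B (Python) =====
-- def find_max_friends(names_lst, friends_lst):
--     """One pass over the dict items, tracking the running maximum and its
--     current list of names, instead of two full scans."""
--     friends_dict = dict(zip(names_lst, friends_lst))
--     maximum = -1
--     winners = []
--     for name, val in friends_dict.items():
--         n = len(val)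
--         if n > maximum:
--             maximum = n
--             winners = [name]
--         elif n == maximum:
--             winners.append(name)
--     return (sorted(winners), maximum)
-- ===== Notes on version B (the rewrite author's own statement) =====
-- stated objective: alternative
-- what changed: Replaces A's two full scans of the dict (one to find the maximum length, one to collect matching names) by a single pass that maintains the running maximum together with its current list of names, resetting the list when a new maximum appears.
import Mathlib
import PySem

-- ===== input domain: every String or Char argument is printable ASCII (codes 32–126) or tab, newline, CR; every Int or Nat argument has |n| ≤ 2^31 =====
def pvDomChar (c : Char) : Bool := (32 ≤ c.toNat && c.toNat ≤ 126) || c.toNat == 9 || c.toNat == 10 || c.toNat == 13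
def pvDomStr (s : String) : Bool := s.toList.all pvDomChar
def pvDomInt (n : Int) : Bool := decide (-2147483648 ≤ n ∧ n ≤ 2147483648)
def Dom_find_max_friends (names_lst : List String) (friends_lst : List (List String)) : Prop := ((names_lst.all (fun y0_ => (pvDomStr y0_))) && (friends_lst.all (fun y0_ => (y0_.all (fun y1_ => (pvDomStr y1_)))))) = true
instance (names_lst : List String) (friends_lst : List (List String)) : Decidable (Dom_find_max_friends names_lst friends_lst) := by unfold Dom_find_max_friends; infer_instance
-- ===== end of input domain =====

-- B replaces A's two scans of the dict (max, then collect) by one pass keeping the running maximum and its list of names; same cost, different traversal.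


-- ===== PORT A =====
def find_max_friends (names_lst : List String) (friends_lst : List (List String)) : List String × Int :=
  let maximum : Int := -1
  let friends_dict := PySem.Dict.ofList (names_lst.zip friends_lst)
  let list_of_max : List String := []
  let maximum := friends_dict.items.foldl
    (fun m p => if (p.2.length : Int) > m then (p.2.length : Int) else m) maximum
  let list_of_max := friends_dict.items.foldl
    (fun acc p => if (p.2.length : Int) == maximum then acc ++ [p.1] else acc) list_of_max
  (PySem.List.sorted list_of_max (fun x => x) false, maximum)

-- ===== PORT B =====
def find_max_friends_alt (names_lst : List String) (friends_lst : List (List String)) : List String × Int :=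
  let friends_dict := PySem.Dict.ofList (names_lst.zip friends_lst)
  let st := friends_dict.items.foldl
    (fun (s : Int × List String) p =>
      let n : Int := p.2.length
      if n > s.1 then (n, [p.1])
      else if n == s.1 then (s.1, s.2 ++ [p.1])
      else s)
    ((-1 : Int), ([] : List String))
  (PySem.List.sorted st.2 (fun x => x) false, st.1)

-- ===== PRECONDITION & SPEC =====
def Spec_find_max_friends (names_lst : List String) (friends_lst : List (List String)) (out : List String × Int) : Prop := out = find_max_friends_alt names_lst friends_lst
instance (names_lst : List String) (friends_lst : List (List String)) (out : List String × Int) : Decidable (Spec_find_max_friends names_lst friends_lst out) := by unfold Spec_find_max_friends; infer_instance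

-- ===== CLAIM (what is proved, stated in full; the proofs are below) =====
def Claim_equal_find_max_friends : Prop := ∀ (names_lst : List String) (friends_lst : List (List String)), Dom_find_max_friends names_lst friends_lst → Spec_find_max_friends names_lst friends_lst (find_max_friends names_lst friends_lst)

-- ===== LEMMAS AND PROOFS =====

-- A's first loop (the running maximum), over an arbitrary item list and start value.
def pvMaxA (l : List (String × List String)) (m0 : Int) : Int :=
  l.foldl (fun m p => if (p.2.length : Int) > m then (p.2.length : Int) else m) m0

lemma pvMaxA_mono (l : List (String × List String)) (m0 : Int) : m0 ≤ pvMaxA l m0 := by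
  induction l generalizing m0 with
  | nil => simp [pvMaxA]
  | cons p t ih =>
    simp only [pvMaxA, List.foldl_cons]
    split_ifs with h
    · exact le_of_lt (lt_of_lt_of_le h (ih _))
    · exact ih m0

-- B's single pass equals: (A's maximum, survivors of the start list ++ names whose length equals that maximum).
lemma pvFoldB_eq (l : List (String × List String)) (m0 : Int) (lst0 : List String) :
    l.foldl (fun (s : Int × List String) p =>
        if (p.2.length : Int) > s.1 then ((p.2.length : Int), [p.1])
        else if (p.2.length : Int) == s.1 then (s.1, s.2 ++ [p.1]) else s)
      (m0, lst0)
    = (pvMaxA l m0,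
       (if pvMaxA l m0 = m0 then lst0 else []) ++
         (l.filter (fun p => (p.2.length : Int) == pvMaxA l m0)).map Prod.fst) := by
  induction l generalizing m0 lst0 with
  | nil => simp [pvMaxA]
  | cons p t ih =>
    simp only [List.foldl_cons]
    by_cases h1 : (p.2.length : Int) > m0
    · have hM : pvMaxA (p :: t) m0 = pvMaxA t (p.2.length : Int) := by
        simp [pvMaxA, h1]
      rw [if_pos h1, ih, hM]
      have hne : ¬ pvMaxA t (p.2.length : Int) = m0 := by
        have := pvMaxA_mono t (p.2.length : Int); omega
      rw [if_neg hne]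
      simp only [List.filter_cons]
      by_cases h2 : ((p.2.length : Int) == pvMaxA t (p.2.length : Int)) = true
      · have he : (p.2.length : Int) = pvMaxA t (p.2.length : Int) := by simpa using h2
        rw [if_pos he.symm]
        simp [h2]
      · have hne2 : ¬ pvMaxA t (p.2.length : Int) = (p.2.length : Int) := by
          simp only [beq_iff_eq] at h2; omega
        rw [if_neg hne2]
        simp [h2]
    · have hM : pvMaxA (p :: t) m0 = pvMaxA t m0 := by simp [pvMaxA, h1]
      rw [if_neg h1, hM]
      by_cases h2 : ((p.2.length : Int) == m0) = true
      · have he : (p.2.length : Int) = m0 := by simpa using h2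
        rw [if_pos h2, ih]
        simp only [List.filter_cons]
        by_cases h3 : pvMaxA t m0 = m0
        · have : ((p.2.length : Int) == pvMaxA t m0) = true := by simp [he, h3]
          simp [h3, he]
        · have : ((p.2.length : Int) == pvMaxA t m0) = false := by
            simp only [beq_eq_false_iff_ne, ne_eq]; omega
          simp [h3, this]
      · rw [if_neg h2, ih]
        have hlt : (p.2.length : Int) < m0 := by
          simp only [beq_iff_eq] at h2; omega
        have hf : ((p.2.length : Int) == pvMaxA t m0) = false := by
          have := pvMaxA_mono t m0
          simp only [beq_eq_false_iff_ne, ne_eq]; omega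
        simp [hf]

-- ===== VERDICT (by name: the statement is the Claim_ definition above) =====
theorem find_max_friends_spec : Claim_equal_find_max_friends := by
  intro names_lst friends_lst _
  unfold Spec_find_max_friends find_max_friends find_max_friends_alt
  dsimp only
  rw [pvFoldB_eq]
  rw [PySem.List.foldl_append_if]
  simp only [pvMaxA, List.nil_append]
  split_ifs <;> simp
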